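-- pv_equiv track=rewrite | github.com/ulis891/Python_lessons | S4.2/HW 4.2.py | make_kust_array
-- ===== SOURCE A (Python) =====
-- def make_kust_array(array: list) -> list:
--     """создаёт масив из рядом стоящих кустов"""
--     three_bushes = []
--     for i in range(len(array)):
--         if i != len(array)-1:
--             three_bushes.append([array[i-1], array[i], array[i+1]])
--         else:
--             three_bushes.append([array[i-1], array[i], array[0]])
--     return three_bushes
-- ===== SOURCE B (Python) =====
-- def make_kust_array(array: list) -> list:
--     """создаёт масив из рядом стоящих кустов"""
--     prev = array[-1:] + array[:-1]
--     nxt = array[1:] + array[:1]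
--     return [[p, c, n] for p, c, n in zip(prev, array, nxt)]
-- ===== Notes on version B (the rewrite author's own statement) =====
-- stated objective: idiomatic
-- what changed: Instead of indexing neighbours per position inside a loop with wraparound index arithmetic, B builds the three rotated copies of the list (rotate-right, identity, rotate-left) via slicing and zips them element-wise into triples.
import Mathlib
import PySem

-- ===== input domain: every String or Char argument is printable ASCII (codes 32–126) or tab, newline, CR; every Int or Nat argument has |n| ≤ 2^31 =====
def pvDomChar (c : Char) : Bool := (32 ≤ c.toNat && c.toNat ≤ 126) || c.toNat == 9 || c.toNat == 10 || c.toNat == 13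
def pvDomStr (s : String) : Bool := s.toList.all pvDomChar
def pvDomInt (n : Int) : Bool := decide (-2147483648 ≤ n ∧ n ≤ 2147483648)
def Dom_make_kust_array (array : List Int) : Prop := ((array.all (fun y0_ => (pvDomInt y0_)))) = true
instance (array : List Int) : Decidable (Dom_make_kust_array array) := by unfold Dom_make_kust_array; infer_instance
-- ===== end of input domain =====

-- B builds the three rotated copies of the list and zips them element-wise instead of
-- indexing neighbours per position (objective: idiomatic; same O(n) cost).

-- ===== PORT A =====
def make_kust_array (array : List Int) : List (List Int) :=
  (PySem.List.pyRange 0 (array.length : Int) 1).foldl (fun three_bushes i =>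
    if i ≠ (array.length : Int) - 1 then
      three_bushes ++ [[(PySem.List.pyGet? array (i - 1)).getD 0,
                        (PySem.List.pyGet? array i).getD 0,
                        (PySem.List.pyGet? array (i + 1)).getD 0]]
    else
      three_bushes ++ [[(PySem.List.pyGet? array (i - 1)).getD 0,
                        (PySem.List.pyGet? array i).getD 0,
                        (PySem.List.pyGet? array 0).getD 0]]) []
  -- pyGet? is always `some` here (i ranges over 0..len-1, i-1 ≥ -1 wraps), so `.getD 0` is exact

-- ===== PORT B =====
def make_kust_array_alt (array : List Int) : List (List Int) :=
  let prev := PySem.List.slice array (some (-1)) none ++ PySem.List.slice array none (some (-1))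
  let nxt := PySem.List.slice array (some 1) none ++ PySem.List.slice array none (some 1)
  (prev.zip (array.zip nxt)).map (fun pcn => [pcn.1, pcn.2.1, pcn.2.2])

-- ===== PRECONDITION & SPEC =====
def Spec_make_kust_array (array : List Int) (out : List (List Int)) : Prop := out = make_kust_array_alt array
instance (array : List Int) (out : List (List Int)) : Decidable (Spec_make_kust_array array out) := by unfold Spec_make_kust_array; infer_instance

-- ===== CLAIM (what is proved, stated in full; the proofs are below) =====
def Claim_equal_make_kust_array : Prop := ∀ (array : List Int), Dom_make_kust_array array → Spec_make_kust_array array (make_kust_array array)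

-- ===== LEMMAS AND PROOFS =====

theorem A_eq_map (array : List Int) :
    make_kust_array array = (List.range array.length).map (fun (k : Nat) =>
      if (k : Int) = (array.length : Int) - 1 then
        [(PySem.List.pyGet? array ((k : Int) - 1)).getD 0,
         (PySem.List.pyGet? array (k : Int)).getD 0,
         (PySem.List.pyGet? array 0).getD 0]
      else
        [(PySem.List.pyGet? array ((k : Int) - 1)).getD 0,
         (PySem.List.pyGet? array (k : Int)).getD 0,
         (PySem.List.pyGet? array ((k : Int) + 1)).getD 0]) := by
  unfold make_kust_array
  have hbody : (fun (acc : List (List Int)) (i : Int) =>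
      if i ≠ (array.length : Int) - 1 then
        acc ++ [[(PySem.List.pyGet? array (i - 1)).getD 0,
                 (PySem.List.pyGet? array i).getD 0,
                 (PySem.List.pyGet? array (i + 1)).getD 0]]
      else
        acc ++ [[(PySem.List.pyGet? array (i - 1)).getD 0,
                 (PySem.List.pyGet? array i).getD 0,
                 (PySem.List.pyGet? array 0).getD 0]]) = fun acc i =>
      acc ++ [if i = (array.length : Int) - 1 then
        [(PySem.List.pyGet? array (i - 1)).getD 0,
         (PySem.List.pyGet? array i).getD 0,
         (PySem.List.pyGet? array 0).getD 0]
      else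
        [(PySem.List.pyGet? array (i - 1)).getD 0,
         (PySem.List.pyGet? array i).getD 0,
         (PySem.List.pyGet? array (i + 1)).getD 0]] := by
    funext acc i; by_cases h : i = (array.length : Int) - 1 <;> simp [h]
  rw [hbody, PySem.List.foldl_append_singleton_eq_map, PySem.List.pyRange_one]
  rw [List.map_map]
  simp only [Function.comp_def, zero_add, Int.sub_zero, Int.toNat_natCast, List.nil_append]

theorem main_eq (a : List Int) : make_kust_array a = make_kust_array_alt a := by
  by_cases hne : a = []
  · subst hne; rfl
  · have hlen : 1 ≤ a.length := by
      rcases a with _ | _ <;> simp_all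
    rw [A_eq_map]
    unfold make_kust_array_alt
    rw [PySem.List.slice_from_neg_one, PySem.List.slice_to_neg_one,
        PySem.List.slice_from_one, PySem.List.slice_to a (by norm_num)]
    apply List.ext_getElem
    · simp; omega
    · intro k h1 h2
      have hk : k < a.length := by simpa using h1
      simp only [List.getElem_map, List.getElem_range, List.getElem_zip]
      have hpk : PySem.List.pyGet? a (k : Int) = some a[k] := by
        rw [PySem.List.pyGet?_natCast]; simp [List.getElem?_eq_getElem hk]
      have h0 : PySem.List.pyGet? a 0 = some (a[0]'(by omega)) := by
        have := PySem.List.pyGet?_of_nonneg a (le_refl (0:Int))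
        rw [this]
        simp [List.getElem?_eq_getElem (show 0 < a.length by omega)]
      have hprev : (List.drop (a.length - 1) a ++ a.dropLast)[k]'(by simp; omega)
          = if k = 0 then a[a.length - 1]'(by omega) else a[k-1]'(by omega) := by
        rw [List.getElem_append]
        split_ifs with h hx hx
        · rw [List.getElem_drop]; congr 1; simp only [List.length_drop] at h; omega
        · simp only [List.length_drop] at h; omega
        · simp only [List.length_drop] at h; omega
        · rw [List.getElem_dropLast]; congr 1; simp only [List.length_drop]; omega
      have hnxt : (a.tail ++ List.take (1:Int).toNat a)[k]'(by simp only [List.length_append, List.length_tail, List.length_take, Int.toNat_one]; omega)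
          = if hK : k = a.length - 1 then a[0]'(by omega) else a[k+1]'(by omega) := by
        rw [List.getElem_append]
        split_ifs with h hx hx
        · simp only [List.length_tail] at h; omega
        · rw [List.getElem_tail]
        · rw [List.getElem_take]; congr 1; simp only [List.length_tail]; omega
        · simp only [List.length_tail] at h; omega
      rw [hprev, hnxt]
      by_cases hk0 : k = 0
      · subst hk0
        have hgm1 : PySem.List.pyGet? a (-1) = some (a[a.length - 1]'(by omega)) := by
          rw [PySem.List.pyGet?_neg_one, List.getLast?_eq_getElem?]
          simp [List.getElem?_eq_getElem (show a.length - 1 < a.length by omega)]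
        by_cases hl : 0 = a.length - 1
        · rw [if_pos (show ((0:Nat):Int) = (a.length:Int) - 1 by omega),
              if_pos rfl, dif_pos hl]
          simp [hgm1, h0]
        · rw [if_neg (show ¬ ((0:Nat):Int) = (a.length:Int) - 1 by omega),
              if_pos rfl, dif_neg hl]
          have hg1 : PySem.List.pyGet? a 1 = some (a[0+1]'(by omega)) := by
            have := PySem.List.pyGet?_of_nonneg a (show (0:Int) ≤ 1 by norm_num)
            rw [this]
            simp [List.getElem?_eq_getElem (show 1 < a.length by omega)]
          simp [hgm1, h0, hg1]
      · have hgm1 : PySem.List.pyGet? a ((k:Int) - 1) = some (a[k-1]'(by omega)) := by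
          rw [show ((k:Int) - 1) = ((k-1 : Nat) : Int) by omega, PySem.List.pyGet?_natCast]
          simp [List.getElem?_eq_getElem (show k - 1 < a.length by omega)]
        by_cases hl : k = a.length - 1
        · rw [if_pos (show (k:Int) = (a.length:Int) - 1 by omega),
              if_neg hk0, dif_pos hl]
          simp [hgm1, hpk, h0]
        · rw [if_neg (show ¬ (k:Int) = (a.length:Int) - 1 by omega),
              if_neg hk0, dif_neg hl]
          have hg1 : PySem.List.pyGet? a ((k:Int) + 1) = some (a[k+1]'(by omega)) := by
            rw [show ((k:Int) + 1) = ((k+1 : Nat) : Int) by omega, PySem.List.pyGet?_natCast]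
            simp [List.getElem?_eq_getElem (show k + 1 < a.length by omega)]
          simp [hgm1, hpk, hg1]

-- ===== VERDICT (by name: the statement is the Claim_ definition above) =====
theorem make_kust_array_spec : Claim_equal_make_kust_array := by
  intro array _
  simpa [Spec_make_kust_array] using main_eq array
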